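-- pv_equiv track=rewrite | github.com/ingedata-net/lisa | src/lisa/json_2_pcd.py | get_box_categories
-- ===== SOURCE A (Python) =====
-- def get_box_categories(boxes):
--   box_categories = { "no_category" : 255 }
--   last_category_index = 0
--   number_of_boxes = len(boxes)
--
--   box_counter = 0
--   while box_counter < number_of_boxes:
--     box = boxes[box_counter]
--
--     if not(box["category"] in box_categories):
--       box_categories[box["category"]] = last_category_index
--       last_category_index += 1
--
--     box_counter += 1
--
--   return box_categories
-- ===== SOURCE B (Python) =====
-- def get_box_categories(boxes):
--   # sort-based: order the distinct categories by their first position, then enumerate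
--   cats = [box["category"] for box in boxes]
--   order = sorted(set(cats), key=cats.index)
--   box_categories = {"no_category": 255}
--   for i, cat in enumerate(c for c in order if c != "no_category"):
--     box_categories[cat] = i
--   return box_categories
-- ===== Notes on version B (the rewrite author's own statement) =====
-- stated objective: alternative
-- what changed: Replaces A's streaming membership-and-counter loop with a sort-based algorithm: collect the categories, order the distinct ones by their first position via sorted(set(cats), key=cats.index), then enumerate them.
import Mathlib
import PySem

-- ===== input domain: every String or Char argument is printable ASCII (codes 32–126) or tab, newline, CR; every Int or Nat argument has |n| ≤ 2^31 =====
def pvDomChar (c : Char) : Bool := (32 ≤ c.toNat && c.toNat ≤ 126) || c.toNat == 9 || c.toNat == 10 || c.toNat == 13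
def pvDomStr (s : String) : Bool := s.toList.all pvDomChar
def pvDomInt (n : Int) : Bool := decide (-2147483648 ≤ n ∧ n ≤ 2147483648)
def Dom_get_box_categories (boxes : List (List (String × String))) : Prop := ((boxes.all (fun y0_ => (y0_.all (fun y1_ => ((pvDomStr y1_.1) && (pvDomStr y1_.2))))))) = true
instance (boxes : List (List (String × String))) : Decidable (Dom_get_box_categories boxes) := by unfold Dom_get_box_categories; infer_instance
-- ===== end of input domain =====

-- B replaces A's streaming membership-and-counter loop by a sort-based algorithm:
-- the distinct categories are ordered by their first position (sorted(set, key=index))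
-- and then enumerated; return value proved equal on Pre_.

-- ===== PORT A =====
-- while loop over box_counter, ported as a fold over range(0, number_of_boxes);
-- boxes[box_counter] via pyGetD (always in range here), box["category"] via
-- first-match lookup (none = KeyError, excluded by Pre_).
def get_box_categories (boxes : List (List (String × String))) : List (String × Int) :=
  let box_categories : PySem.Dict String Int := PySem.Dict.empty.insert "no_category" 255
  let number_of_boxes : Int := boxes.length
  let r :=
    (PySem.List.pyRange 0 number_of_boxes 1).foldl
      (fun (st : PySem.Dict String Int × Int) i =>
        let box := PySem.List.pyGetD boxes i []
        match (box.find? (fun p => p.1 == "category")).map (·.2) with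
        | some cat =>
            if st.1.contains cat then st else (st.1.insert cat st.2, st.2 + 1)
        | none => st)
      (box_categories, 0)
  r.1.items

-- ===== PORT B =====
-- sorted(set(cats), key=cats.index): the sort keys (first positions) are pairwise
-- distinct, so the result does not depend on the set's iteration order and the port
-- via PySem.Set.ofList is exact; cats.index(c) never raises here since c ∈ cats,
-- so '(index? cats c).getD 0' is exact on every element the key is applied to.
def get_box_categories_alt (boxes : List (List (String × String))) : List (String × Int) :=
  let cats : List String := boxes.filterMap (fun box => (box.find? (fun p => p.1 == "category")).map (·.2))
  let order : List String := PySem.List.sorted (PySem.Set.ofList cats) (fun c => (PySem.List.index? cats c).getD 0) false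
  let r :=
    (PySem.List.enumerate (order.filter (fun c => c != "no_category")) 0).foldl
      (fun (d : PySem.Dict String Int) p => d.insert p.2 p.1)
      (PySem.Dict.empty.insert "no_category" 255)
  r.items

-- ===== PRECONDITION & SPEC =====
-- Pre_ excludes boxes missing the "category" key, where both Pythons raise KeyError.
def Pre_get_box_categories (boxes : List (List (String × String))) : Prop :=
  ∀ box ∈ boxes, box.any (fun p => p.1 == "category") = true
instance (boxes : List (List (String × String))) : Decidable (Pre_get_box_categories boxes) := by unfold Pre_get_box_categories; infer_instance
def pvWitness_get_box_categories : (List (List (String × String))) :=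
  [[("category", "car")], [("category", "tree"), ("id", "7")], [("category", "car")]]
def Spec_get_box_categories (boxes : List (List (String × String))) (out : List (String × Int)) : Prop := out = get_box_categories_alt boxes
instance (boxes : List (List (String × String))) (out : List (String × Int)) : Decidable (Spec_get_box_categories boxes out) := by unfold Spec_get_box_categories; infer_instance

-- ===== CLAIM (what is proved, stated in full; the proofs are below) =====
def Claim_equal_get_box_categories : Prop := ∀ (boxes : List (List (String × String))), Dom_get_box_categories boxes → Pre_get_box_categories boxes → Spec_get_box_categories boxes (get_box_categories boxes)

-- ===== LEMMAS AND PROOFS =====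

-- A's loop body (used only by the proofs)
def pvStep (st : PySem.Dict String Int × Int) (cat : String) : PySem.Dict String Int × Int :=
  if st.1.contains cat then st else (st.1.insert cat st.2, st.2 + 1)

lemma pvStep_contains (st : PySem.Dict String Int × Int) (cat c : String)
    (h : st.1.contains c = true) : (pvStep st cat).1.contains c = true := by
  unfold pvStep
  split
  · exact h
  · simp [PySem.Dict.contains_insert, h]

lemma pvStep_contains_self (st : PySem.Dict String Int × Int) (cat : String) :
    (pvStep st cat).1.contains cat = true := by
  unfold pvStep
  split
  · assumption
  · simp

lemma pv_prefix_add_fold (cs : List String) (acc : PySem.Set String) :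
    acc <+: cs.foldl PySem.Set.add acc := by
  induction cs generalizing acc with
  | nil => exact List.prefix_refl acc
  | cons c cs ih =>
      simp only [List.foldl_cons]
      refine List.IsPrefix.trans ?_ (ih (PySem.Set.add acc c))
      unfold PySem.Set.add
      split
      · exact List.prefix_refl acc
      · exact List.prefix_append acc [c]

-- folding A's loop body over the category list equals folding it over set(cats) in first-occurrence order
lemma pv_fold_dedup (cs : List String) (s : PySem.Dict String Int × Int)
    (acc : PySem.Set String)
    (hacc : ∀ c ∈ acc, s.1.contains c = true) :
    cs.foldl pvStep s = ((cs.foldl PySem.Set.add acc).drop acc.length).foldl pvStep s := by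
  induction cs generalizing s acc with
  | nil => simp
  | cons c cs ih =>
      simp only [List.foldl_cons]
      by_cases hc : acc.contains c = true
      · have hmem : c ∈ acc := by simpa [PySem.Set.contains] using hc
        have hsc : s.1.contains c = true := hacc c hmem
        have hadd : PySem.Set.add acc c = acc := by
          simp [PySem.Set.add, hmem]
        rw [hadd]
        have hstep : pvStep s c = s := by unfold pvStep; simp [hsc]
        rw [hstep]
        exact ih s acc hacc
      · have hnmem : c ∉ acc := by simpa [PySem.Set.contains] using hc
        have hadd : PySem.Set.add acc c = acc ++ [c] := by
          simp [PySem.Set.add, hnmem]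
        rw [hadd]
        obtain ⟨rest, hrest⟩ := pv_prefix_add_fold cs (acc ++ [c])
        have hdrop : (cs.foldl PySem.Set.add (acc ++ [c])).drop acc.length
            = c :: (cs.foldl PySem.Set.add (acc ++ [c])).drop (acc ++ [c]).length := by
          rw [← hrest]
          simp [List.drop_append]
        rw [hdrop]
        simp only [List.foldl_cons]
        refine ih (pvStep s c) (acc ++ [c]) ?_
        intro c' hc'
        rcases List.mem_append.mp hc' with h | h
        · exact pvStep_contains s c c' (hacc c' h)
        · simp only [List.mem_singleton] at h
          subst h
          exact pvStep_contains_self _ _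

-- A's index loop is the fold of pvStep over the category list
lemma pv_A_eq_fold (boxes : List (List (String × String))) :
    get_box_categories boxes
      = ((boxes.filterMap (fun box => (box.find? (fun p => p.1 == "category")).map (·.2))).foldl
          pvStep (PySem.Dict.empty.insert "no_category" 255, 0)).1.items := by
  unfold get_box_categories
  show ((PySem.List.pyRange 0 (boxes.length : Int) 1).foldl
      (fun (st : PySem.Dict String Int × Int) i =>
        match ((PySem.List.pyGetD boxes i []).find? (fun p => p.1 == "category")).map (·.2) with
        | some cat => pvStep st cat
        | none => st)
      (PySem.Dict.empty.insert "no_category" 255, 0)).1.items = _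
  rw [PySem.List.foldl_pyRange_zero_pyGetD' boxes ([] : List (String × String))
      (fun (st : PySem.Dict String Int × Int) box =>
        match (box.find? (fun p => p.1 == "category")).map (·.2) with
        | some cat => pvStep st cat
        | none => st)
      (PySem.Dict.empty.insert "no_category" 255, 0)]
  congr 1
  generalize (PySem.Dict.empty.insert "no_category" (255 : Int), (0 : Int)) = init
  induction boxes generalizing init with
  | nil => rfl
  | cons b bs ih =>
      simp only [List.foldl_cons, List.filterMap_cons]
      cases h : (b.find? (fun p => p.1 == "category")).map (·.2) with
      | none => exact ih _
      | some cat => exact ih _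

-- set(xs) in first-occurrence order, peeled one element at a time
lemma pv_foldl_add_acc (l : List String) (acc : PySem.Set String) :
    l.foldl PySem.Set.add acc = acc ++ (l.foldl PySem.Set.add []).filter (fun c => decide (c ∉ acc)) := by
  induction l generalizing acc with
  | nil => simp
  | cons x l ih =>
      simp only [List.foldl_cons]
      have h2 : PySem.Set.add ([] : PySem.Set String) x = [x] := by simp [PySem.Set.add]
      by_cases hx : x ∈ acc
      · have h1 : PySem.Set.add acc x = acc := by simp [PySem.Set.add, hx]
        rw [h1, h2, ih acc, ih [x]]
        congr 1
        simp only [List.filter_append, List.filter_filter]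
        have hfx : List.filter (fun c => decide (c ∉ acc)) [x] = [] := by simp [hx]
        rw [hfx, List.nil_append]
        apply List.filter_congr
        intro a _
        by_cases hax : a = x
        · subst hax; simp [hx]
        · simp [hax]
      · have h1 : PySem.Set.add acc x = acc ++ [x] := by simp [PySem.Set.add, hx]
        rw [h1, h2, ih (acc ++ [x]), ih [x]]
        simp only [List.filter_append, List.filter_filter, List.append_assoc]
        congr 1
        have hfx' : List.filter (fun c => decide (c ∉ acc)) [x] = [x] := by simp [hx]
        rw [hfx']
        congr 1
        apply List.filter_congr
        intro a _
        by_cases hax : a = x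
        · subst hax; simp
        · by_cases ha : a ∈ acc <;> simp [hax, ha]

lemma pv_ofList_cons (x : String) (xs : List String) :
    PySem.Set.ofList (x :: xs) = x :: (PySem.Set.ofList xs).filter (fun c => decide (c ≠ x)) := by
  rw [PySem.Set.ofList_eq_foldl, PySem.Set.ofList_eq_foldl]
  simp only [List.foldl_cons]
  have h2 : PySem.Set.add ([] : PySem.Set String) x = [x] := by simp [PySem.Set.add]
  rw [h2, pv_foldl_add_acc xs [x]]
  simp only [List.singleton_append, List.mem_singleton]

-- set(cats) in first-occurrence order is strictly increasing under the first-position key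
lemma pv_ofList_pairwise (xs : List String) :
    (PySem.Set.ofList xs).Pairwise
      (fun a b => (PySem.List.index? xs a).getD 0 < (PySem.List.index? xs b).getD 0) := by
  induction xs with
  | nil => simp [PySem.Set.ofList_eq_foldl]
  | cons x xs ih =>
      rw [pv_ofList_cons]
      constructor
      · intro b hb
        have hbne : b ≠ x := by
          have := List.of_mem_filter hb
          simpa using this
        have hbmem : b ∈ xs := by
          have hb' : b ∈ PySem.Set.ofList xs := List.mem_of_mem_filter hb
          have : b ∈ PySem.List.dedup xs := by rw [PySem.List.dedup_eq_ofList]; exact hb'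
          exact (PySem.List.mem_dedup xs b).mp this
        rw [PySem.List.index?_cons_self, PySem.List.index?_cons_of_ne xs (Ne.symm hbne)]
        obtain ⟨k, hk⟩ := Option.isSome_iff_exists.mp ((PySem.List.index?_isSome_iff xs b).mpr hbmem)
        rw [PySem.List.index?_eq_idxOf?] at hk
        simp [hk]
      · have hfp : ((PySem.Set.ofList xs).filter (fun c => decide (c ≠ x))).Pairwise
            (fun a b => (PySem.List.index? xs a).getD 0 < (PySem.List.index? xs b).getD 0) :=
          List.Pairwise.sublist List.filter_sublist ih
        refine List.Pairwise.imp_of_mem ?_ hfp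
        intro a b ha hb hab
        have hane : a ≠ x := by have := List.of_mem_filter ha; simpa using this
        have hbne : b ≠ x := by have := List.of_mem_filter hb; simpa using this
        rw [PySem.List.index?_cons_of_ne xs (Ne.symm hane),
            PySem.List.index?_cons_of_ne xs (Ne.symm hbne)]
        cases hia : PySem.List.index? xs a <;> cases hib : PySem.List.index? xs b <;>
          rw [hia, hib] at hab <;> simp_all

-- the sort by first position leaves set(cats) in its first-occurrence order
lemma pv_sorted_ofList (cats : List String) :
    PySem.List.sorted (PySem.Set.ofList cats) (fun c => (PySem.List.index? cats c).getD 0) false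
      = PySem.Set.ofList cats :=
  PySem.List.sorted_eq_of_perm_of_pairwise_lt _ _ _ (List.Perm.refl _) (pv_ofList_pairwise cats)

-- A's counter loop over a duplicate-free list = numbering of its non-"no_category" elements
lemma pv_fold_items (L : List String) (d : PySem.Dict String Int) (k : Int)
    (hnc : d.contains "no_category" = true)
    (hfresh : ∀ c ∈ L, c ≠ "no_category" → d.contains c = false)
    (hnodup : L.Nodup) :
    (L.foldl pvStep (d, k)).1.items
      = ((PySem.List.enumerate (L.filter (fun c => c != "no_category")) k).foldl
          (fun (e : PySem.Dict String Int) p => e.insert p.2 p.1) d).items := by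
  induction L generalizing d k with
  | nil => rfl
  | cons c L ih =>
      rcases List.nodup_cons.mp hnodup with ⟨hcL, hnd⟩
      by_cases hc : c = "no_category"
      · subst hc
        have hstep : pvStep (d, k) "no_category" = (d, k) := by
          unfold pvStep; simp [hnc]
        simp only [List.foldl_cons, hstep, List.filter_cons]
        simp only [bne_self_eq_false, Bool.false_eq_true, if_false]
        exact ih d k hnc (fun c' hc' h => hfresh c' (List.mem_cons_of_mem _ hc') h) hnd
      · have hf : d.contains c = false := hfresh c (List.mem_cons_self ..) hc
        have hstep : pvStep (d, k) c = (d.insert c k, k + 1) := by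
          unfold pvStep; simp [hf]
        have hfilter : (c :: L).filter (fun c => c != "no_category")
            = c :: L.filter (fun c => c != "no_category") := by
          simp [hc]
        simp only [List.foldl_cons, hstep, hfilter, PySem.List.enumerate_cons]
        refine ih (d.insert c k) (k + 1) ?_ ?_ hnd
        · simp [PySem.Dict.contains_insert, hnc]
        · intro c' hc' h
          have : ¬ (c' == c) := by
            simp only [beq_iff_eq]
            intro he; exact hcL (he ▸ hc')
          simp [PySem.Dict.contains_insert, this, hfresh c' (List.mem_cons_of_mem _ hc') h]

-- ===== VERDICT (by name: the statement is the Claim_ definition above) =====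
theorem get_box_categories_spec : Claim_equal_get_box_categories := by
  intro boxes _ _
  show get_box_categories boxes = get_box_categories_alt boxes
  rw [pv_A_eq_fold]
  set cats := boxes.filterMap (fun box => (box.find? (fun p => p.1 == "category")).map (·.2)) with hcats
  have hA : cats.foldl pvStep (PySem.Dict.empty.insert "no_category" 255, 0)
      = (PySem.Set.ofList cats).foldl pvStep (PySem.Dict.empty.insert "no_category" 255, 0) := by
    have h := pv_fold_dedup cats (PySem.Dict.empty.insert "no_category" 255, 0) [] (by simp)
    simpa [PySem.Set.ofList_eq_foldl] using h
  rw [hA]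
  have hitems := pv_fold_items (PySem.Set.ofList cats) (PySem.Dict.empty.insert "no_category" 255) 0
    (by simp)
    (by intro c _ h; simp [PySem.Dict.contains_insert, h])
    (by
      have := PySem.List.nodup_dedup (xs := cats)
      rwa [PySem.List.dedup_eq_ofList] at this)
  rw [hitems]
  show _ = ((PySem.List.enumerate
      ((PySem.List.sorted (PySem.Set.ofList cats) (fun c => (PySem.List.index? cats c).getD 0) false).filter
        (fun c => c != "no_category")) 0).foldl
      (fun (d : PySem.Dict String Int) p => d.insert p.2 p.1)
      (PySem.Dict.empty.insert "no_category" 255)).items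
  rw [pv_sorted_ofList]
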